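-- pv_equiv track=rewrite | github.com/page1597/Algorithm | 프로그래머스/2/42626. 더 맵게/더 맵게.py | solution
-- ===== SOURCE A (Python) =====
-- import heapq
--
-- def solution(scoville, K):
--     heapq.heapify(scoville)
--
--     count = 0
--
--     while len(scoville) > 1:
--         first_popped = heapq.heappop(scoville)
--         second_popped = heapq.heappop(scoville)
--
--         if first_popped >= K:
--             break
--
--         count += 1
--         mixed_scoville = first_popped + (second_popped * 2)
--
--         heapq.heappush(scoville, mixed_scoville)
--     if len(scoville) == 1 and scoville[0] < K:
--         count = -1
--     answer = count
--     return answer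
-- ===== SOURCE B (Python) =====
-- def solution(scoville, K):
--     # Two-queue technique: sort once, then keep new mixes in a FIFO list.
--     # The global minimum is always at the front of one of the two queues,
--     # so each extraction is O(1) and no priority queue is needed.
--     orig = sorted(scoville)
--     mixed = []
--     oi = mi = 0
--     count = 0
--
--     def size():
--         return (len(orig) - oi) + (len(mixed) - mi)
--
--     def pop_min():
--         nonlocal oi, mi
--         if oi < len(orig) and (mi == len(mixed) or orig[oi] <= mixed[mi]):
--             v = orig[oi]
--             oi += 1
--         else:
--             v = mixed[mi]
--             mi += 1
--         return v
--
--     while size() > 1: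
--         first = pop_min()
--         second = pop_min()
--         if first >= K:
--             break
--         count += 1
--         mixed.append(first + 2 * second)
--
--     if size() == 1:
--         last = orig[oi] if oi < len(orig) else mixed[mi]
--         if last < K:
--             count = -1
--     return count
-- ===== Notes on version B (the rewrite author's own statement) =====
-- stated objective: faster
-- what changed: Replaces the binary heap by the two-queue technique: sort once, keep newly mixed values in a FIFO queue; since coexisting mixes are provably nondecreasing, the global minimum is always at the front of one of the two queues, so each extraction is O(1) with no priority-queue maintenance at all.
import Mathlib
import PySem

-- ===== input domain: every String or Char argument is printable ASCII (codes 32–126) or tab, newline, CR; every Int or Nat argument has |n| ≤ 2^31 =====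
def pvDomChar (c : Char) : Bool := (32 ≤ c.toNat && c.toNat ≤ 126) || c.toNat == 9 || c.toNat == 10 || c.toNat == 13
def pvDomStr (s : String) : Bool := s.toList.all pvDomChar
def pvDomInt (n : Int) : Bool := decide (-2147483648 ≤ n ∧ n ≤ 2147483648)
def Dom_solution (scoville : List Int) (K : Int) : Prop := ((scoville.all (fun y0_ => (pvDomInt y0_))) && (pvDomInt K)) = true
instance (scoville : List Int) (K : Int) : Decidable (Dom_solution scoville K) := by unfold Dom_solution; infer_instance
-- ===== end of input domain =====

-- B replaces A's binary heap by the two-queue technique: sort once, keep new mixes in a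
-- FIFO queue; the minimum is always at the front of one of the two queues, so each
-- extraction is O(1) (objective: faster loop, no priority-queue maintenance).
-- A mutates `scoville` in place (heapify/pop/push), B does not; the equivalence proved
-- here is about the RETURN value only.

-- ===== PORT A =====
-- A's heap state is modelled by the list of its elements: heapq.heappop returns the
-- minimum of the heap and removes one occurrence of it (exact for Int elements, whose
-- equal values are indistinguishable), heapq.heappush adds the element, heapq.heapify
-- is the identity on the element multiset.
def pvMinOf : List Int → Int
  | [] => 0          -- unreachable: every heappop in A happens with len(scoville) > 1
  | a :: t => t.foldl min a

theorem pvMinOf_mem (l : List Int) (h : l ≠ []) : pvMinOf l ∈ l := by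
  cases l with
  | nil => exact absurd rfl h
  | cons a t =>
    simp only [pvMinOf]
    rcases PySem.List.foldl_min_mem t a with h1 | h1
    · rw [h1]; exact List.mem_cons_self
    · exact List.mem_cons_of_mem _ h1

-- the while loop of A, on the heap contents and the running count
def solutionLoop (K : Int) : List Int → Int → Int
  | [], count => count
  | [x], count => if x < K then -1 else count
  | a :: b :: t, count =>
    let first := pvMinOf (a :: b :: t)
    let l1 := (a :: b :: t).erase first
    let second := pvMinOf l1
    let l2 := l1.erase second
    if first ≥ K then
      -- break: the post-loop 'len == 1 and scoville[0] < K' check on the remaining heap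
      match l2 with
      | [x] => if x < K then -1 else count
      | _ => count
    else solutionLoop K (l2 ++ [first + second * 2]) (count + 1)
termination_by l _ => l.length
decreasing_by
  have h1 : pvMinOf (a :: b :: t) ∈ a :: b :: t := pvMinOf_mem _ (by simp)
  have e1 : ((a :: b :: t).erase (pvMinOf (a :: b :: t))).length = t.length + 1 := by
    rw [List.length_erase_of_mem h1]; simp
  have hne : ((a :: b :: t).erase (pvMinOf (a :: b :: t))) ≠ [] := by
    intro h; rw [h] at e1; simp at e1
  have h2 := pvMinOf_mem _ hne
  have e2 := List.length_erase_of_mem h2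
  simp only [List.length_append, e2, e1]
  simp

def solution (scoville : List Int) (K : Int) : Int :=
  solutionLoop K scoville 0

-- ===== PORT B =====
-- B consumes `orig` (the sorted input) and `mixed` (the FIFO of mixes) through front
-- pointers; a pointer into a list is ported as the remaining suffix of that list.
-- pop_min: take the smaller front, preferring `orig` on a tie, exactly as in Source B
def tqPop (os q : List Int) : Int × List Int × List Int :=
  match os, q with
  | [], [] => (0, [], [])          -- unreachable: pop_min is only called on size() ≥ 1
  | a :: os', [] => (a, os', [])
  | [], b :: q' => (b, [], q')
  | a :: os', b :: q' => if a ≤ b then (a, os', b :: q') else (b, a :: os', q')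

theorem tqPop_length (os q : List Int) (h : 1 ≤ os.length + q.length) :
    (tqPop os q).2.1.length + (tqPop os q).2.2.length + 1 = os.length + q.length := by
  match os, q with
  | [], [] => simp at h
  | a :: os', [] => simp [tqPop]
  | [], b :: q' => simp [tqPop]
  | a :: os', b :: q' =>
    simp only [tqPop]
    split <;> simp <;> omega

-- 'orig[oi] if oi < len(orig) else mixed[mi]' on the remaining suffixes
def tqHead (os q : List Int) : Int :=
  match os with
  | a :: _ => a
  | [] => match q with
    | b :: _ => b
    | [] => 0                      -- unreachable: only read when size() == 1

-- the while loop of Source B, followed by its post-loop 'size()==1 and last<K' check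
def tqLoop (K : Int) (os q : List Int) (count : Int) : Int :=
  if 1 < os.length + q.length then
    let p1 := tqPop os q
    let p2 := tqPop p1.2.1 p1.2.2
    if p1.1 ≥ K then
      -- break jumps to the post-loop check
      if p2.2.1.length + p2.2.2.length = 1 ∧ tqHead p2.2.1 p2.2.2 < K then -1 else count
    else tqLoop K p2.2.1 (p2.2.2 ++ [p1.1 + 2 * p2.1]) (count + 1)
  else
    if os.length + q.length = 1 ∧ tqHead os q < K then -1 else count
termination_by os.length + q.length
decreasing_by
  have h1 := tqPop_length os q (by omega)
  have h2 := tqPop_length (tqPop os q).2.1 (tqPop os q).2.2 (by omega)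
  simp only [List.length_append, List.length_cons, List.length_nil]
  omega

def solution_alt (scoville : List Int) (K : Int) : Int :=
  tqLoop K (PySem.List.sorted scoville (fun x => x)) [] 0

-- ===== PRECONDITION & SPEC =====
def Spec_solution (scoville : List Int) (K : Int) (out : Int) : Prop := out = solution_alt scoville K
instance (scoville : List Int) (K : Int) (out : Int) : Decidable (Spec_solution scoville K out) := by unfold Spec_solution; infer_instance

-- ===== CLAIM (what is proved, stated in full; the proofs are below) =====
def Claim_equal_solution : Prop := ∀ (scoville : List Int) (K : Int), Dom_solution scoville K → Spec_solution scoville K (solution scoville K)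

-- ===== LEMMAS AND PROOFS =====

theorem pvMinOf_le (l : List Int) (y : Int) (hy : y ∈ l) : pvMinOf l ≤ y := by
  cases l with
  | nil => cases hy
  | cons a t =>
    simp only [pvMinOf]
    rcases List.mem_cons.1 hy with rfl | h1
    · exact (PySem.List.foldl_min_le t y).1
    · exact (PySem.List.foldl_min_le t a).2 y h1

-- insert x into the sorted list s keeping it sorted (proof-side intermediate loop)
def pvInsort (s : List Int) (x : Int) : List Int :=
  let i := PySem.List.bisectRight s x
  s.take i ++ x :: s.drop i

-- intermediate model: A's loop on the SORTED list of the pool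
def isLoop (K : Int) : List Int → Int → Int
  | [], count => count
  | [x], count => if x < K then -1 else count
  | a :: b :: t, count =>
    if a < K then isLoop K (pvInsort t (a + 2 * b)) (count + 1) else count
termination_by l _ => l.length
decreasing_by
  simp only [pvInsort, List.length_append, List.length_take, List.length_drop,
    List.length_cons]
  omega

-- sorting exposes the minimum in front: sorted l = min :: sorted (l minus that min)
theorem sorted_eq_min_cons (l : List Int) (h : l ≠ []) :
    PySem.List.sorted l (fun x => x) =
      pvMinOf l :: PySem.List.sorted (l.erase (pvMinOf l)) (fun x => x) := by
  have hm : pvMinOf l ∈ l := pvMinOf_mem l h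
  apply PySem.List.sorted_id_eq_of_perm_of_pairwise
  · exact ((PySem.List.sorted_perm _ _ _).cons _).trans (List.perm_cons_erase hm).symm
  · rw [List.pairwise_cons]
    refine ⟨fun y hy => ?_, PySem.List.sorted_pairwise _ _⟩
    exact pvMinOf_le l y (List.mem_of_mem_erase ((PySem.List.sorted_perm _ _ _).mem_iff.1 hy))

-- appending one element and re-sorting is insort into the sorted list
theorem sorted_append_eq_insort (r : List Int) (x : Int) :
    PySem.List.sorted (r ++ [x]) (fun y => y) =
      pvInsort (PySem.List.sorted r (fun y => y)) x := by
  set s := PySem.List.sorted r (fun y => y) with hs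
  obtain ⟨hle, hlt, hgt⟩ :=
    PySem.List.bisectRight_spec s x (PySem.List.sorted_pairwise r (fun y => y))
  set i := PySem.List.bisectRight s x with hi
  have htake : ∀ y ∈ s.take i, y ≤ x := by
    intro y hy
    obtain ⟨j, hj, rfl⟩ := List.mem_iff_getElem.1 hy
    rw [List.getElem_take]
    exact hlt j (by simp at hj; omega) (by simp at hj; omega)
  have hdrop : ∀ y ∈ s.drop i, x < y := by
    intro y hy
    obtain ⟨j, hj, rfl⟩ := List.mem_iff_getElem.1 hy
    rw [List.getElem_drop]
    exact hgt (i + j) (by simp at hj; omega) (by omega)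
  have hpair := PySem.List.sorted_pairwise r (fun y => y)
  rw [← hs] at hpair
  apply PySem.List.sorted_id_eq_of_perm_of_pairwise
  · refine List.perm_middle.trans ?_
    rw [List.take_append_drop]
    exact ((PySem.List.sorted_perm r (fun y => y) false).cons x).trans
      (List.perm_append_singleton x r).symm
  · rw [pvInsort]
    apply List.pairwise_append.2
    refine ⟨List.Pairwise.sublist (List.take_sublist _ _) hpair, ?_, ?_⟩
    · rw [List.pairwise_cons]
      exact ⟨fun y hy => le_of_lt (hdrop y hy), List.Pairwise.sublist (List.drop_sublist _ _) hpair⟩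
    · intro y hy z hz
      rcases List.mem_cons.1 hz with rfl | hz'
      · exact htake y hy
      · exact le_of_lt (lt_of_le_of_lt (htake y hy) (hdrop z hz'))

-- A's heap loop equals the sorted-list loop started on the sorted pool
theorem loop_eq (K : Int) (n : Nat) :
    ∀ (l : List Int) (c : Int), l.length ≤ n →
      solutionLoop K l c = isLoop K (PySem.List.sorted l (fun x => x)) c := by
  induction n with
  | zero =>
    intro l c hl
    have : l = [] := List.length_eq_zero_iff.1 (Nat.le_zero.1 hl)
    subst this
    simp [solutionLoop, PySem.List.sorted, isLoop]
  | succ n ih =>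
    intro l c hl
    match l with
    | [] => simp [solutionLoop, PySem.List.sorted, isLoop]
    | [x] =>
      have : PySem.List.sorted [x] (fun y => y) = [x] :=
        PySem.List.sorted_id_eq_of_perm_of_pairwise _ _ (List.Perm.refl _) (by simp)
      rw [this]
      simp [solutionLoop, isLoop]
    | a :: b :: t =>
      have hne : (a :: b :: t) ≠ [] := by simp
      set m1 := pvMinOf (a :: b :: t) with hm1
      set l1 := (a :: b :: t).erase m1 with hl1
      have hm1mem : m1 ∈ a :: b :: t := pvMinOf_mem _ hne
      have e1 : l1.length = t.length + 1 := by
        rw [hl1, List.length_erase_of_mem hm1mem]; simp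
      have hne1 : l1 ≠ [] := by intro h; rw [h] at e1; simp at e1
      set m2 := pvMinOf l1 with hm2
      set l2 := l1.erase m2 with hl2
      have hm2mem : m2 ∈ l1 := pvMinOf_mem _ hne1
      have e2 : l2.length = t.length := by
        rw [hl2, List.length_erase_of_mem hm2mem, e1]
        omega
      have hsort : PySem.List.sorted (a :: b :: t) (fun x => x) =
          m1 :: m2 :: PySem.List.sorted l2 (fun x => x) := by
        rw [sorted_eq_min_cons _ hne, ← hm1, ← hl1, sorted_eq_min_cons _ hne1, ← hm2, ← hl2]
      rw [hsort, solutionLoop, isLoop]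
      simp only [← hm1, ← hl1, ← hm2, ← hl2]
      by_cases hK : m1 ≥ K
      · rw [if_pos hK, if_neg (by omega)]
        match hx : l2 with
        | [] => rfl
        | [x] =>
          have hx2 : x ∈ l1.erase m2 := by rw [← hl2]; simp
          have hx1 : x ∈ l1 := List.mem_of_mem_erase hx2
          have hxmem : x ∈ a :: b :: t := List.mem_of_mem_erase (hl1 ▸ hx1)
          have : ¬ x < K := by have := pvMinOf_le _ x hxmem; rw [← hm1] at this; omega
          simp [this]
        | _ :: _ :: _ => rfl
      · rw [if_neg hK, if_pos (by omega)]
        have hrec : (l2 ++ [m1 + m2 * 2]).length ≤ n := by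
          simp [e2]
          have : (a :: b :: t).length ≤ n + 1 := hl
          simp at this
          omega
        rw [ih _ _ hrec, sorted_append_eq_insort]
        ring_nf

-- ===== the two-queue side =====

-- merge of the two front suffixes, with B's tie rule (prefer `orig`)
def pvMerge : List Int → List Int → List Int
  | [], q => q
  | os, [] => os
  | a :: os', b :: q' => if a ≤ b then a :: pvMerge os' (b :: q') else b :: pvMerge (a :: os') q'
termination_by os q => os.length + q.length

theorem pvMerge_nil_right (os : List Int) : pvMerge os [] = os := by
  cases os <;> simp [pvMerge]

theorem pvMerge_perm (os q : List Int) : List.Perm (pvMerge os q) (os ++ q) := by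
  induction os, q using pvMerge.induct with
  | case1 q => simp [pvMerge]
  | case2 os h => rw [pvMerge_nil_right]; simp
  | case3 a os' b q' hab ih =>
    simp only [pvMerge, if_pos hab]
    exact (ih.cons a).trans (List.Perm.refl _)
  | case4 a os' b q' hab ih =>
    simp only [pvMerge, if_neg hab]
    exact (ih.cons b).trans List.perm_middle.symm

theorem pvMerge_pairwise (os q : List Int) (hos : os.Pairwise (· ≤ ·))
    (hq : q.Pairwise (· ≤ ·)) : (pvMerge os q).Pairwise (· ≤ ·) := by
  induction os, q using pvMerge.induct with
  | case1 q => simpa [pvMerge] using hq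
  | case2 os h => rw [pvMerge_nil_right]; exact hos
  | case3 a os' b q' hab ih =>
    simp only [pvMerge, if_pos hab]
    rw [List.pairwise_cons]
    constructor
    · intro y hy
      have hy' : y ∈ os' ++ b :: q' := (pvMerge_perm os' (b :: q')).mem_iff.1 hy
      rcases List.mem_append.1 hy' with h1 | h1
      · exact List.rel_of_pairwise_cons hos h1
      · rcases List.mem_cons.1 h1 with rfl | h2
        · exact hab
        · exact le_trans hab (List.rel_of_pairwise_cons hq h2)
    · exact ih (List.Pairwise.sublist (List.sublist_cons_self a os') hos) hq
  | case4 a os' b q' hab ih =>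
    simp only [pvMerge, if_neg hab]
    rw [List.pairwise_cons]
    constructor
    · intro y hy
      have hy' : y ∈ (a :: os') ++ q' := (pvMerge_perm (a :: os') q').mem_iff.1 hy
      have hba : b ≤ a := le_of_lt (lt_of_not_ge hab)
      rcases List.mem_append.1 hy' with h1 | h1
      · rcases List.mem_cons.1 h1 with rfl | h2
        · exact hba
        · exact le_trans hba (List.rel_of_pairwise_cons hos h2)
      · exact List.rel_of_pairwise_cons hq h1
    · exact ih hos (List.Pairwise.sublist (List.sublist_cons_self b q') hq)

-- popping exposes the head of the merge
theorem tqPop_merge (os q : List Int) (h : 1 ≤ os.length + q.length) :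
    pvMerge os q = (tqPop os q).1 :: pvMerge (tqPop os q).2.1 (tqPop os q).2.2 := by
  match os, q with
  | [], [] => simp at h
  | a :: os', [] => simp [tqPop, pvMerge_nil_right]
  | [], b :: q' => simp [tqPop, pvMerge]
  | a :: os', b :: q' =>
    by_cases hab : a ≤ b
    · simp [tqPop, pvMerge, hab]
    · simp [tqPop, pvMerge, hab]

-- the popped element comes from the front of one of the two queues
theorem tqPop_src (os q : List Int) (h : 1 ≤ os.length + q.length) :
    (os = (tqPop os q).1 :: (tqPop os q).2.1 ∧ (tqPop os q).2.2 = q) ∨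
    (q = (tqPop os q).1 :: (tqPop os q).2.2 ∧ (tqPop os q).2.1 = os) := by
  match os, q with
  | [], [] => simp at h
  | a :: os', [] => left; simp [tqPop]
  | [], b :: q' => right; simp [tqPop]
  | a :: os', b :: q' =>
    by_cases hab : a ≤ b
    · left; simp [tqPop, hab]
    · right; simp [tqPop, hab]

theorem tqHead_singleton (os q : List Int) (h : os.length + q.length = 1) :
    pvMerge os q = [tqHead os q] := by
  match os, q with
  | [x], [] => simp [pvMerge_nil_right, tqHead]
  | [], [x] => simp [pvMerge, tqHead]
  | [], [] => simp at h
  | a :: b :: t, q2 => simp at h; omega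
  | [a], c :: q2 => simp at h
  | [], _ :: _ :: _ => simp at h

-- witness invariant: every queued mix v was created as a+2b from two values a ≤ b that
-- were then minimal, so v ≤ 3b and b is below everything still present except v itself
def Wit (os l r : List Int) (v : Int) : Prop :=
  ∃ b, v ≤ 3 * b ∧ (∀ x ∈ os, b ≤ x) ∧ (∀ x ∈ l, b ≤ x) ∧ (∀ x ∈ r, b ≤ x)

def INV (os q : List Int) : Prop :=
  os.Pairwise (· ≤ ·) ∧ q.Pairwise (· ≤ ·) ∧
    ∀ l v r, q = l ++ v :: r → Wit os l r v

theorem append_singleton_split (q2 : List Int) (m : Int) :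
    ∀ (l' : List Int) (v : Int) (r' : List Int), q2 ++ [m] = l' ++ v :: r' →
      (∃ r'', q2 = l' ++ v :: r'' ∧ r' = r'' ++ [m]) ∨ (l' = q2 ∧ v = m ∧ r' = []) := by
  induction q2 with
  | nil =>
    intro l' v r' h
    match l' with
    | [] => right; simp at h; simp [h.1, h.2]
    | x :: l'' =>
      exfalso
      have h' := congrArg List.length h
      simp only [List.length_append, List.length_cons, List.length_nil] at h'
      omega
  | cons a q2' ih =>
    intro l' v r' h
    match l' with
    | [] =>
      simp at h
      obtain ⟨rfl, h2⟩ := h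
      left; exact ⟨q2', rfl, h2.symm⟩
    | x :: l'' =>
      simp at h
      obtain ⟨rfl, h2⟩ := h
      rcases ih l'' v r' h2 with ⟨r'', hr1, hr2⟩ | ⟨h1, h2', h3⟩
      · left; exact ⟨r'', by simp [hr1], hr2⟩
      · right; simp [h1, h2', h3]

-- core preservation: one mixing step keeps the invariant
theorem INV_step_core (os q os2 q2 OP QP : List Int) (f s : Int)
    (hos : os = OP ++ os2) (hq : q = QP ++ q2)
    (hf : f ∈ OP ++ QP) (hs : s ∈ OP ++ QP) (hfs : f ≤ s)
    (hgs1 : ∀ x ∈ os2, s ≤ x) (hgs2 : ∀ x ∈ q2, s ≤ x)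
    (hinv : INV os q) : INV os2 (q2 ++ [f + 2 * s]) := by
  obtain ⟨hpos, hpq, hwit⟩ := hinv
  -- a witness bound b of any surviving entry lies below f and s
  have hbfs : ∀ (b : Int), (∀ x ∈ os, b ≤ x) → (∀ x ∈ QP, b ≤ x) → b ≤ f ∧ b ≤ s := by
    intro b hbo hbq
    constructor
    · rcases List.mem_append.1 hf with h1 | h1
      · exact hbo f (hos ▸ List.mem_append.2 (Or.inl h1))
      · exact hbq f h1
    · rcases List.mem_append.1 hs with h1 | h1
      · exact hbo s (hos ▸ List.mem_append.2 (Or.inl h1))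
      · exact hbq s h1
  -- each survivor is bounded by the new mix
  have hvm : ∀ v ∈ q2, v ≤ f + 2 * s := by
    intro v hv
    obtain ⟨l, r, rfl⟩ := List.append_of_mem hv
    obtain ⟨b, hb1, hb2, hb3, hb4⟩ :=
      hwit (QP ++ l) v r (by rw [hq]; simp)
    have hbl : ∀ x ∈ QP, b ≤ x := fun x hx => hb3 x (List.mem_append.2 (Or.inl hx))
    obtain ⟨hbf, hbs⟩ := hbfs b hb2 hbl
    omega
  refine ⟨List.Pairwise.sublist (hos ▸ List.sublist_append_right OP os2) hpos, ?_, ?_⟩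
  · -- q2 ++ [m] is sorted
    apply List.pairwise_append.2
    refine ⟨List.Pairwise.sublist (hq ▸ List.sublist_append_right QP q2) hpq, by simp, ?_⟩
    intro v hv z hz
    rcases List.mem_singleton.1 hz with rfl
    exact hvm v hv
  · -- every entry of q2 ++ [m] still has a witness
    intro l' v r' hsplit
    rcases append_singleton_split q2 (f + 2 * s) l' v r' hsplit with
      ⟨r'', hr1, rfl⟩ | ⟨rfl, rfl, rfl⟩
    · -- a survivor: reuse its old witness
      obtain ⟨b, hb1, hb2, hb3, hb4⟩ :=
        hwit (QP ++ l') v r'' (by rw [hq, hr1]; simp)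
      have hbl : ∀ x ∈ QP, b ≤ x := fun x hx => hb3 x (List.mem_append.2 (Or.inl hx))
      obtain ⟨hbf, hbs⟩ := hbfs b hb2 hbl
      have hsv : s ≤ v := hgs2 v (by rw [hr1]; simp)
      refine ⟨b, hb1, ?_, ?_, ?_⟩
      · intro x hx; exact hb2 x (hos ▸ List.mem_append.2 (Or.inr hx))
      · intro x hx; exact hb3 x (List.mem_append.2 (Or.inr hx))
      · intro x hx
        rcases List.mem_append.1 hx with h1 | h1
        · exact hb4 x h1
        · rcases List.mem_singleton.1 h1 with rfl
          -- b ≤ f + 2s, from b ≤ f, b ≤ s, s ≤ v, v ≤ 3b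
          omega
    · -- the new mix: witnessed by s itself
      exact ⟨s, by omega, hgs1, hgs2, by simp⟩

-- the two-queue loop equals the sorted-list loop on the merged pool
theorem tq_eq (K : Int) (n : Nat) :
    ∀ (os q : List Int) (c : Int), os.length + q.length ≤ n → INV os q →
      tqLoop K os q c = isLoop K (pvMerge os q) c := by
  induction n with
  | zero =>
    intro os q c hn hinv
    have h1 : os = [] := by cases os <;> simp_all
    have h2 : q = [] := by cases q <;> simp_all
    subst h1; subst h2
    rw [tqLoop]
    simp [pvMerge, isLoop]
  | succ n ih =>
    intro os q c hn hinv
    by_cases hlen : 1 < os.length + q.length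
    · -- at least two elements: pop twice
      have hL1 : 1 ≤ os.length + q.length := by omega
      have hmer1 := tqPop_merge os q hL1
      have hsrc1 := tqPop_src os q hL1
      have hlen1 := tqPop_length os q hL1
      set f := (tqPop os q).1 with hfd
      set os1 := (tqPop os q).2.1 with hos1d
      set q1 := (tqPop os q).2.2 with hq1d
      have hL2 : 1 ≤ os1.length + q1.length := by omega
      have hmer2 := tqPop_merge os1 q1 hL2
      have hsrc2 := tqPop_src os1 q1 hL2
      have hlen2 := tqPop_length os1 q1 hL2
      set s := (tqPop os1 q1).1 with hsd
      set os2 := (tqPop os1 q1).2.1 with hos2d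
      set q2 := (tqPop os1 q1).2.2 with hq2d
      have hmerge : pvMerge os q = f :: s :: pvMerge os2 q2 := by rw [hmer1, hmer2]
      have hpair : (pvMerge os q).Pairwise (· ≤ ·) :=
        pvMerge_pairwise os q hinv.1 hinv.2.1
      rw [hmerge] at hpair
      have hfs : f ≤ s := (List.pairwise_cons.1 hpair).1 s (by simp)
      have hfT : ∀ x ∈ pvMerge os2 q2, f ≤ x := by
        intro x hx
        exact (List.pairwise_cons.1 hpair).1 x (by simp [hx])
      have hsT : ∀ x ∈ pvMerge os2 q2, s ≤ x := by
        intro x hx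
        exact List.rel_of_pairwise_cons (List.pairwise_cons.1 hpair).2 hx
      have hmemT : ∀ x : Int, x ∈ os2 ∨ x ∈ q2 → x ∈ pvMerge os2 q2 := by
        intro x hx
        exact (pvMerge_perm os2 q2).mem_iff.2 (List.mem_append.2 hx)
      rw [tqLoop]
      rw [if_pos hlen, hmerge, isLoop]
      simp only [← hfd, ← hsd, ← hos1d, ← hq1d, ← hos2d, ← hq2d]
      by_cases hK : f ≥ K
      · rw [if_pos hK, if_neg (show ¬ f < K by omega)]
        apply if_neg
        rintro ⟨hone, hhd⟩
        have h1 := tqHead_singleton os2 q2 hone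
        have h2 : tqHead os2 q2 ∈ pvMerge os2 q2 := by rw [h1]; simp
        have := hfT _ h2
        omega
      · rw [if_neg hK, if_pos (show f < K by omega)]
        have hgs1 : ∀ x ∈ os2, s ≤ x := fun x hx => hsT x (hmemT x (Or.inl hx))
        have hgs2 : ∀ x ∈ q2, s ≤ x := fun x hx => hsT x (hmemT x (Or.inr hx))
        have hinv' : INV os2 (q2 ++ [f + 2 * s]) := by
          rcases hsrc1 with ⟨hA, hB⟩ | ⟨hA, hB⟩ <;>
            rcases hsrc2 with ⟨hC, hD⟩ | ⟨hC, hD⟩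
          · exact INV_step_core os q os2 q2 [f, s] [] f s
              (by simp only [List.cons_append, List.nil_append]; rw [hA, hC]) (by simp only [List.nil_append]; rw [hD, hB])
              (by simp) (by simp) hfs hgs1 hgs2 hinv
          · exact INV_step_core os q os2 q2 [f] [s] f s
              (by simp only [List.cons_append, List.nil_append]; rw [hD, hA]) (by simp only [List.cons_append, List.nil_append]; rw [← hB, hC])
              (by simp) (by simp) hfs hgs1 hgs2 hinv
          · exact INV_step_core os q os2 q2 [s] [f] f s
              (by simp only [List.cons_append, List.nil_append]; rw [← hB, hC]) (by simp only [List.cons_append, List.nil_append]; rw [hD, hA])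
              (by simp) (by simp) hfs hgs1 hgs2 hinv
          · exact INV_step_core os q os2 q2 [] [f, s] f s
              (by simp only [List.nil_append]; rw [hD, ← hB]) (by simp only [List.cons_append, List.nil_append]; rw [hA, hC])
              (by simp) (by simp) hfs hgs1 hgs2 hinv
        have hrec : os2.length + (q2 ++ [f + 2 * s]).length ≤ n := by
          simp only [List.length_append, List.length_cons, List.length_nil]
          omega
        rw [ih os2 (q2 ++ [f + 2 * s]) (c + 1) hrec hinv']
        congr 1
        -- both sides are the sorted list of (pvMerge os2 q2) ++ [mix]
        have hTpair : (pvMerge os2 q2).Pairwise (· ≤ ·) :=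
          (List.pairwise_cons.1 (List.pairwise_cons.1 hpair).2).2
        have hTid : PySem.List.sorted (pvMerge os2 q2) (fun y => y) = pvMerge os2 q2 :=
          PySem.List.sorted_id_eq_of_perm_of_pairwise _ _ (List.Perm.refl _) hTpair
        have h2 : PySem.List.sorted (pvMerge os2 q2 ++ [f + 2 * s]) (fun y => y) =
            pvMerge os2 (q2 ++ [f + 2 * s]) := by
          apply PySem.List.sorted_id_eq_of_perm_of_pairwise
          · refine (pvMerge_perm os2 (q2 ++ [f + 2 * s])).trans ?_
            rw [← List.append_assoc]
            exact List.Perm.append_right _ (pvMerge_perm os2 q2).symm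
          · exact pvMerge_pairwise os2 (q2 ++ [f + 2 * s]) hinv'.1 hinv'.2.1
        rw [← h2, sorted_append_eq_insort, hTid]
    · rw [tqLoop, if_neg hlen]
      by_cases h1 : os.length + q.length = 1
      · rw [tqHead_singleton os q h1]
        simp [isLoop, h1]
      · have h0 : os.length + q.length = 0 := by omega
        have ho : os = [] := by cases os <;> simp_all
        have hq : q = [] := by cases q <;> simp_all
        subst ho; subst hq
        simp [pvMerge, isLoop]

-- ===== VERDICT (by name: the statement is the Claim_ definition above) =====
theorem solution_spec : Claim_equal_solution := by
  intro scoville K _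
  unfold Spec_solution solution solution_alt
  rw [loop_eq K scoville.length scoville 0 le_rfl]
  have hperm := PySem.List.sorted_perm scoville (fun x => x) false
  have hinv : INV (PySem.List.sorted scoville (fun x => x)) [] :=
    ⟨PySem.List.sorted_pairwise scoville (fun x => x), by simp, by intro l v r h; simp at h⟩
  rw [tq_eq K ((PySem.List.sorted scoville (fun x => x)).length) _ [] 0 (by simp) hinv,
    pvMerge_nil_right]
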